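-- pv_equiv track=rewrite | github.com/NanoRequiem/Uni_year1_code | Year_1/Programming for the web/Coursework 3/diabetes.py | get_barchart_data
-- ===== SOURCE A (Python) =====
-- def get_barchart_data(data):
--
--     bardata = [[0, 0], [0, 0]]
--     for x in data:
--         if(x[1] == "Male" and x[16] == "Positive"):
--             bardata[0][0] += 1
--         elif(x[1] == "Male" and x[16] == "Negative"):
--             bardata[0][1] += 1
--         elif(x[1] == "Female" and x[16] == "Positive"):
--             bardata[1][0] += 1
--         elif(x[1] == "Female" and x[16] == "Negative"):
--             bardata[1][1] += 1
--     return bardata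
-- ===== SOURCE B (Python) =====
-- def get_barchart_data(data):
--     def count(gender, result):
--         return sum(1 for x in data if x[1] == gender and x[16] == result)
--     return [[count(g, r) for r in ("Positive", "Negative")]
--             for g in ("Male", "Female")]
-- ===== Notes on version B (the rewrite author's own statement) =====
-- stated objective: simpler
-- what changed: Replaces the single pass that mutates a nested 2x2 list through a four-way elif chain with four independent filter-count passes (sum of a generator per cell), assembled by a comprehension with no mutable state.
import Mathlib
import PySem

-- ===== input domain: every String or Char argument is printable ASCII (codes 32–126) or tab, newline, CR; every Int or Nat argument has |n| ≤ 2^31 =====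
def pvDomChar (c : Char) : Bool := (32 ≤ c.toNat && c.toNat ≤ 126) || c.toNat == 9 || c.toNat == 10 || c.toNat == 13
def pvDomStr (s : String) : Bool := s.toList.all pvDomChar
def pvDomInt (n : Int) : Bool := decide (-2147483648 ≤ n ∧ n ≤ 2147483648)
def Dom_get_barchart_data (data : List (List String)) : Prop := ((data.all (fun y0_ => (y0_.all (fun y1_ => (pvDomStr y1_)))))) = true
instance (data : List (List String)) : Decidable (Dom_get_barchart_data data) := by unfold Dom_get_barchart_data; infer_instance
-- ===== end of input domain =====

-- B replaces A's single pass that mutates a nested 2x2 list via a four-way elif chain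
-- with four independent filter-count passes assembled by a comprehension (simpler; same cost).

-- ===== PORT A =====
-- bardata[i][j] += 1 on the nested list
def pvBump (b : List (List Int)) (i j : Nat) : List (List Int) :=
  b.set i ((b.getD i []).set j ((b.getD i []).getD j 0 + 1))

-- x[1] / x[16] via pyGetD with default "": exact under Pre_ (in range whenever A evaluates
-- the index); when x[1] ∉ {Male,Female} the default "" fires no branch, exactly as A skips.
def get_barchart_data (data : List (List String)) : List (List Int) :=
  data.foldl (fun bardata x =>
    let g := PySem.List.pyGetD x 1 ""
    let r := PySem.List.pyGetD x 16 ""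
    if g = "Male" ∧ r = "Positive" then pvBump bardata 0 0
    else if g = "Male" ∧ r = "Negative" then pvBump bardata 0 1
    else if g = "Female" ∧ r = "Positive" then pvBump bardata 1 0
    else if g = "Female" ∧ r = "Negative" then pvBump bardata 1 1
    else bardata) [[0, 0], [0, 0]]

-- ===== PORT B =====
-- sum(1 for x in data if x[1] == gender and x[16] == result) = count of matching rows;
-- x[1]/x[16] via pyGetD with default "": exact under Pre_ as for the A port.
def pvCellCount (data : List (List String)) (g r : String) : Int :=
  (data.countP (fun x =>
    decide (PySem.List.pyGetD x 1 "" = g ∧ PySem.List.pyGetD x 16 "" = r)) : Int)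

def get_barchart_data_alt (data : List (List String)) : List (List Int) :=
  ["Male", "Female"].map (fun g =>
    ["Positive", "Negative"].map (fun r => pvCellCount data g r))

-- ===== PRECONDITION & SPEC =====
-- Pre_ excludes exactly the rows on which the Python raises IndexError: a row shorter than 2,
-- or a row whose gender field is "Male"/"Female" but which has no column 16.
def Pre_get_barchart_data (data : List (List String)) : Prop :=
  ∀ x ∈ data, 2 ≤ x.length ∧
    ((x.getD 1 "" = "Male" ∨ x.getD 1 "" = "Female") → 17 ≤ x.length)
instance (data : List (List String)) : Decidable (Pre_get_barchart_data data) := by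
  unfold Pre_get_barchart_data; infer_instance

def pvWitness_get_barchart_data : List (List String) :=
  [["0", "Male", "", "", "", "", "", "", "", "", "", "", "", "", "", "", "Positive"],
   ["1", "Other"]]

def Spec_get_barchart_data (data : List (List String)) (out : List (List Int)) : Prop := out = get_barchart_data_alt data
instance (data : List (List String)) (out : List (List Int)) : Decidable (Spec_get_barchart_data data out) := by unfold Spec_get_barchart_data; infer_instance

-- ===== CLAIM (what is proved, stated in full; the proofs are below) =====
def Claim_equal_get_barchart_data : Prop := ∀ (data : List (List String)), Dom_get_barchart_data data → Pre_get_barchart_data data → Spec_get_barchart_data data (get_barchart_data data)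

-- ===== LEMMAS AND PROOFS =====

lemma pvCellCount_cons (g r : String) (x : List String) (l : List (List String)) :
    pvCellCount (x :: l) g r =
      (if PySem.List.pyGetD x 1 "" = g ∧ PySem.List.pyGetD x 16 "" = r then 1 else 0)
        + pvCellCount l g r := by
  simp [pvCellCount, List.countP_cons]
  split_ifs <;> omega

-- A's fold from an arbitrary 2x2 table adds the four cell counts
lemma foldA_eq (data : List (List String)) : ∀ (a b c d : Int),
    data.foldl (fun bardata x =>
      let g := PySem.List.pyGetD x 1 ""
      let r := PySem.List.pyGetD x 16 ""
      if g = "Male" ∧ r = "Positive" then pvBump bardata 0 0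
      else if g = "Male" ∧ r = "Negative" then pvBump bardata 0 1
      else if g = "Female" ∧ r = "Positive" then pvBump bardata 1 0
      else if g = "Female" ∧ r = "Negative" then pvBump bardata 1 1
      else bardata) [[a, b], [c, d]]
    = [[a + pvCellCount data "Male" "Positive", b + pvCellCount data "Male" "Negative"],
       [c + pvCellCount data "Female" "Positive", d + pvCellCount data "Female" "Negative"]] := by
  induction data with
  | nil => intro a b c d; simp [pvCellCount]
  | cons x l ih =>
    intro a b c d
    simp only [List.foldl_cons]
    split_ifs with h1 h2 h3 h4
    · rw [show pvBump [[a, b], [c, d]] 0 0 = [[a + 1, b], [c, d]] from rfl, ih,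
        pvCellCount_cons, pvCellCount_cons, pvCellCount_cons, pvCellCount_cons]
      simp only [h1.1, h1.2, String.reduceEq, and_false, false_and, and_self, and_true,
        if_true, if_false, List.cons.injEq]
      refine ⟨⟨by ring, by ring⟩, by ring, by ring⟩
    · rw [show pvBump [[a, b], [c, d]] 0 1 = [[a, b + 1], [c, d]] from rfl, ih,
        pvCellCount_cons, pvCellCount_cons, pvCellCount_cons, pvCellCount_cons]
      simp only [h2.1, h2.2, String.reduceEq, and_false, false_and, and_self, and_true,
        if_true, if_false, List.cons.injEq]
      refine ⟨⟨by ring, by ring⟩, by ring, by ring⟩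
    · rw [show pvBump [[a, b], [c, d]] 1 0 = [[a, b], [c + 1, d]] from rfl, ih,
        pvCellCount_cons, pvCellCount_cons, pvCellCount_cons, pvCellCount_cons]
      simp only [h3.1, h3.2, String.reduceEq, and_false, false_and, and_self, and_true,
        if_true, if_false, List.cons.injEq]
      refine ⟨⟨by ring, by ring⟩, by ring, by ring⟩
    · rw [show pvBump [[a, b], [c, d]] 1 1 = [[a, b], [c, d + 1]] from rfl, ih,
        pvCellCount_cons, pvCellCount_cons, pvCellCount_cons, pvCellCount_cons]
      simp only [h4.1, h4.2, String.reduceEq, and_false, false_and, and_self, and_true,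
        if_true, if_false, List.cons.injEq]
      refine ⟨⟨by ring, by ring⟩, by ring, by ring⟩
    · rw [ih, pvCellCount_cons, pvCellCount_cons, pvCellCount_cons, pvCellCount_cons]
      simp [h1, h2, h3, h4]

-- ===== VERDICT (by name: the statement is the Claim_ definition above) =====
theorem get_barchart_data_spec : Claim_equal_get_barchart_data := by
  intro data _ _
  show get_barchart_data data = get_barchart_data_alt data
  unfold get_barchart_data get_barchart_data_alt
  rw [foldA_eq data 0 0 0 0]
  simp
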